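-- pv_equiv track=rewrite | github.com/rwgk/rwgk_config | bin/bash_history_cleanup.py | is_ts_line
-- ===== SOURCE A (Python) =====
-- def is_ts_line(s: str) -> bool:
--     # Timestamp line must be: "#" + spaces + digits + optional spaces + newline
--     if not s.startswith("#"):
--         return False
--     i = 1
--     n = len(s)
--     # skip spaces
--     while i < n and s[i].isspace():
--         i += 1
--     # must have at least one digit
--     j = i
--     while i < n and s[i].isdigit():
--         i += 1
--     if i == j:
--         return False
--     # only trailing whitespace allowed
--     while i < n and s[i].isspace():
--         i += 1
--     return i == n
-- ===== SOURCE B (Python) =====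
-- def is_ts_line(s: str) -> bool:
--     if not s.startswith("#"):
--         return False
--     core = s[1:].strip()
--     return core != "" and core.isdigit()
-- ===== Notes on version B (the rewrite author's own statement) =====
-- stated objective: simpler
-- what changed: Replaces the three index-walking while loops (skip spaces, count digits, skip trailing spaces) with a single slice+strip and one isdigit test on the stripped core.
import Mathlib
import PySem

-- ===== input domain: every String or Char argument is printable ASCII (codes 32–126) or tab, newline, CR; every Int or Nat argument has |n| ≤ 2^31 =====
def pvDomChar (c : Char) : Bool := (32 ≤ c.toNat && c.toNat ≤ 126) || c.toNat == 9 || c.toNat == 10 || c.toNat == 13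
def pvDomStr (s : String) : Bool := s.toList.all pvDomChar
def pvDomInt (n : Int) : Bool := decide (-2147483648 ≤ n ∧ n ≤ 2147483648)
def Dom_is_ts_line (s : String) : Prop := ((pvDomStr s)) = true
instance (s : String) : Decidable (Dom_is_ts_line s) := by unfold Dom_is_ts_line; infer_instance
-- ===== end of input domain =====

-- B replaces A's three index-walking while loops with one slice+strip and a single isdigit test (simpler).

-- ===== PORT A =====
-- A walks an index through: '#', a run of spaces, a run of digits (at least one), a run of
-- spaces, end of string.  Each 'while i < n and pred(s[i]): i += 1' loop is ported as the
-- corresponding dropWhile over the remaining characters (the loop consumes exactly that run).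
def is_ts_line (s : String) : Bool :=
  if PySem.Str.startswith s "#" then
    let rest1 := (s.toList.drop 1).dropWhile PySem.Chars.isspace   -- skip spaces
    let rest2 := rest1.dropWhile PySem.Chars.isdigit               -- consume digits
    if rest1.length == rest2.length then false                     -- i == j: no digit
    else decide (rest2.dropWhile PySem.Chars.isspace = [])         -- trailing ws, then i == n
  else false

-- ===== PORT B =====
def is_ts_line_alt (s : String) : Bool :=
  if PySem.Str.startswith s "#" then
    let core := PySem.Str.strip (PySem.Str.slice s (some 1) none)
    decide (core ≠ "") && PySem.Str.strIsdigit core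
  else false

-- ===== PRECONDITION & SPEC =====
def Spec_is_ts_line (s : String) (out : Bool) : Prop := out = is_ts_line_alt s
instance (s : String) (out : Bool) : Decidable (Spec_is_ts_line s out) := by unfold Spec_is_ts_line; infer_instance

-- ===== CLAIM (what is proved, stated in full; the proofs are below) =====
def Claim_equal_is_ts_line : Prop := ∀ (s : String), Dom_is_ts_line s → Spec_is_ts_line s (is_ts_line s)

-- ===== LEMMAS AND PROOFS =====

theorem digit_not_space (c : Char) (h : PySem.Chars.isdigit c = true) :
    PySem.Chars.isspace c = false := by
  simp only [PySem.Chars.isdigit, Bool.and_eq_true, decide_eq_true_eq, Char.le_def,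
    UInt32.le_iff_toNat_le] at h
  have e0 : ('0' : Char).val.toNat = 48 := rfl
  have e9 : ('9' : Char).val.toNat = 57 := rfl
  rw [e0, e9] at h
  simp only [PySem.Chars.isspace, Bool.or_eq_false_iff, Bool.and_eq_false_iff,
    decide_eq_false_iff_not, Char.toNat]
  omega

-- rstrip of (digits ++ spaces) is the digits, when the digit part is nonempty
theorem rstrip_digits_spaces (d t : List Char)
    (hdall : ∀ c ∈ d, PySem.Chars.isdigit c = true)
    (htall : ∀ c ∈ t, PySem.Chars.isspace c = true) :
    PySem.Chars.rstrip (d ++ t) = d := by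
  unfold PySem.Chars.rstrip
  rw [List.reverse_append, List.dropWhile_append]
  have h1 : t.reverse.dropWhile PySem.Chars.isspace = [] := by
    rw [List.dropWhile_eq_nil_iff]
    intro c hc; exact htall c (List.mem_reverse.mp hc)
  rw [h1]
  simp only [List.isEmpty_nil, if_pos]
  have h2 : d.reverse.dropWhile PySem.Chars.isspace = d.reverse := by
    cases hdr : d.reverse with
    | nil => rfl
    | cons a l =>
      have ha : PySem.Chars.isdigit a = true := by
        apply hdall
        exact List.mem_reverse.mp (hdr ▸ List.mem_cons_self)
      rw [List.dropWhile_cons, digit_not_space a ha]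
      simp
  rw [h2, List.reverse_reverse]

-- dropWhile isdigit over (digits ++ spaces) leaves exactly the spaces
theorem dropDigits_digits_spaces (g sp : List Char)
    (hgall : ∀ c ∈ g, PySem.Chars.isdigit c = true)
    (hspall : ∀ c ∈ sp, PySem.Chars.isspace c = true) :
    (g ++ sp).dropWhile PySem.Chars.isdigit = sp := by
  rw [List.dropWhile_append]
  have h1 : g.dropWhile PySem.Chars.isdigit = [] := by
    rw [List.dropWhile_eq_nil_iff]
    intro c hc; exact hgall c hc
  rw [h1]
  simp only [List.isEmpty_nil, if_pos]
  cases hspc : sp with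
  | nil => rfl
  | cons a l =>
    have ha : PySem.Chars.isspace a = true := hspall a (hspc ▸ List.mem_cons_self)
    have hnd : PySem.Chars.isdigit a = false := by
      by_contra h
      have := digit_not_space a (by simpa using h)
      rw [this] at ha; exact absurd ha (by simp)
    rw [List.dropWhile_cons, hnd]
    simp

-- any list decomposes as its rstrip followed by trailing whitespace
theorem rstrip_decomp (r : List Char) :
    r = PySem.Chars.rstrip r ++ (r.reverse.takeWhile PySem.Chars.isspace).reverse ∧
    (∀ c ∈ (r.reverse.takeWhile PySem.Chars.isspace).reverse, PySem.Chars.isspace c = true) := by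
  constructor
  · unfold PySem.Chars.rstrip
    conv_lhs => rw [← List.reverse_reverse r,
      ← List.takeWhile_append_dropWhile (p := PySem.Chars.isspace) (l := r.reverse)]
    rw [List.reverse_append]
  · intro c hc
    exact List.mem_takeWhile_imp (List.mem_reverse.mp hc)

-- A's loop condition holds iff the stripped core is a nonempty run of digits.
theorem core_equiv (r : List Char) :
    (¬ ((r.dropWhile PySem.Chars.isspace).length =
        ((r.dropWhile PySem.Chars.isspace).dropWhile PySem.Chars.isdigit).length) ∧
     ((r.dropWhile PySem.Chars.isspace).dropWhile PySem.Chars.isdigit).dropWhile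
        PySem.Chars.isspace = [])
    ↔ (PySem.Chars.strip r ≠ [] ∧ (PySem.Chars.strip r).all PySem.Chars.isdigit = true) := by
  have hstrip : PySem.Chars.strip r =
      PySem.Chars.rstrip (r.dropWhile PySem.Chars.isspace) := rfl
  rw [hstrip]
  generalize r.dropWhile PySem.Chars.isspace = r1
  constructor
  · rintro ⟨hlen, hsp⟩
    have hsplit : r1 = r1.takeWhile PySem.Chars.isdigit ++ r1.dropWhile PySem.Chars.isdigit :=
      (List.takeWhile_append_dropWhile).symm
    have hdall : ∀ c ∈ r1.takeWhile PySem.Chars.isdigit, PySem.Chars.isdigit c = true :=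
      fun c hc => List.mem_takeWhile_imp hc
    have htall : ∀ c ∈ r1.dropWhile PySem.Chars.isdigit, PySem.Chars.isspace c = true := by
      intro c hc
      exact (List.dropWhile_eq_nil_iff.mp hsp) c hc
    have hdne : r1.takeWhile PySem.Chars.isdigit ≠ [] := by
      intro h
      apply hlen
      conv_lhs => rw [hsplit, h]
      simp
    have hrs : PySem.Chars.rstrip r1 = r1.takeWhile PySem.Chars.isdigit := by
      conv_lhs => rw [hsplit]
      exact rstrip_digits_spaces _ _ hdall htall
    rw [hrs]
    exact ⟨hdne, List.all_eq_true.mpr (fun c hc => hdall c hc)⟩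
  · rintro ⟨hne, hall⟩
    obtain ⟨hdecomp, hspall⟩ := rstrip_decomp r1
    have hgall : ∀ c ∈ PySem.Chars.rstrip r1, PySem.Chars.isdigit c = true := by
      intro c hc; exact List.all_eq_true.mp hall c hc
    have hdrop : r1.dropWhile PySem.Chars.isdigit =
        (r1.reverse.takeWhile PySem.Chars.isspace).reverse := by
      conv_lhs => rw [hdecomp]
      exact dropDigits_digits_spaces _ _ hgall hspall
    constructor
    · rw [hdrop]
      intro hlen
      apply hne
      have hlens := congrArg List.length hdecomp
      rw [List.length_append] at hlens
      rw [← hlen] at hlens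
      have : (PySem.Chars.rstrip r1).length = 0 := by omega
      exact List.eq_nil_of_length_eq_zero this
    · rw [hdrop, List.dropWhile_eq_nil_iff]
      exact hspall

theorem ports_agree (s : String) : is_ts_line s = is_ts_line_alt s := by
  unfold is_ts_line is_ts_line_alt
  by_cases hs : PySem.Str.startswith s "#"
  · rw [if_pos hs, if_pos hs]
    have hcore : (PySem.Str.strip (PySem.Str.slice s (some 1) none)).toList
        = PySem.Chars.strip (s.toList.drop 1) := by
      rw [PySem.Str.toList_strip, PySem.Str.toList_slice]
      simp [PySem.Chars.slice_eq_listSlice, PySem.List.slice_from_one, List.drop_one]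
    set core := PySem.Str.strip (PySem.Str.slice s (some 1) none) with hc
    -- left side as one decide
    have hL : (if (((s.toList.drop 1).dropWhile PySem.Chars.isspace).length ==
          (((s.toList.drop 1).dropWhile PySem.Chars.isspace).dropWhile PySem.Chars.isdigit).length) = true
        then false
        else decide ((((s.toList.drop 1).dropWhile PySem.Chars.isspace).dropWhile
            PySem.Chars.isdigit).dropWhile PySem.Chars.isspace = []))
        = decide (¬ (((s.toList.drop 1).dropWhile PySem.Chars.isspace).length =
            (((s.toList.drop 1).dropWhile PySem.Chars.isspace).dropWhile PySem.Chars.isdigit).length) ∧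
          (((s.toList.drop 1).dropWhile PySem.Chars.isspace).dropWhile
            PySem.Chars.isdigit).dropWhile PySem.Chars.isspace = []) := by
      by_cases h : ((s.toList.drop 1).dropWhile PySem.Chars.isspace).length =
          (((s.toList.drop 1).dropWhile PySem.Chars.isspace).dropWhile PySem.Chars.isdigit).length
      · rw [if_pos (by simpa using h), eq_comm, decide_eq_false_iff_not]
        intro hcon; exact hcon.1 h
      · rw [if_neg (by simpa using h), eq_comm, decide_eq_decide]
        exact and_iff_right h
    -- right side as one decide
    have hne : (core ≠ "") ↔ core.toList ≠ [] := by
      constructor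
      · intro h hnil; exact h (String.toList_inj.mp (by simpa using hnil))
      · intro h hnil; exact h (by rw [hnil]; rfl)
    have hR : (decide (core ≠ "") && PySem.Str.strIsdigit core)
        = decide (core.toList ≠ [] ∧ core.toList.all PySem.Chars.isdigit = true) := by
      rw [PySem.Str.strIsdigit_eq]
      unfold PySem.Chars.strIsdigit
      rw [Bool.eq_iff_iff]
      simp only [Bool.and_eq_true, decide_eq_true_eq, Bool.not_eq_eq_eq_not, Bool.not_true,
        List.all_eq_true, ne_eq]
      constructor
      · rintro ⟨h1, h2, h3⟩
        refine ⟨?_, h3⟩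
        intro h; rw [h] at h2; simp at h2
      · rintro ⟨h2, h3⟩
        refine ⟨hne.mpr h2, ?_, h3⟩
        cases hE : core.toList.isEmpty
        · rfl
        · exact absurd (List.isEmpty_iff.mp hE) h2
    rw [hL, hR]
    apply decide_eq_decide.mpr
    rw [hcore]
    exact core_equiv (s.toList.drop 1)
  · rw [if_neg hs, if_neg hs]

-- ===== VERDICT (by name: the statement is the Claim_ definition above) =====
theorem is_ts_line_spec : Claim_equal_is_ts_line := by
  intro s _
  unfold Spec_is_ts_line
  exact ports_agree s
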